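-- pv_equiv track=rewrite | github.com/Sathishr424/Leetcode-Challenges | The Fiscal Code.py | getSurName
-- ===== SOURCE A (Python) =====
-- vov = "aeiou"
--
-- def checkIf(x):
-- 	for i in vov:
-- 		if i == x:
-- 			return True
-- 	return False
--
-- def getSurName(val):
-- 	tmp = ""
-- 	ret = ""
-- 	for i in range(len(val)):
-- 		if not checkIf(val[i].lower()) and len(ret) < 3:
-- 			ret+=str(val[i].upper())
-- 		elif len(ret) >= 3: break
-- 		else: tmp+=str(val[i].upper())
-- 	if (len(ret) < 3):
-- 		for i in tmp:
-- 			if len(ret) < 3: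
-- 				ret += str(i)
-- 			else: break
-- 	if (len(ret) < 3):
-- 		for i in range(3-len(ret)):
-- 			ret+="X"
-- 	return ret
-- ===== SOURCE B (Python) =====
-- def getSurName(val):
--     # Stable sort: consonants (key False) come before vowels (key True),
--     # each group keeping its original order; take the first 3 and pad with X.
--     ordered = sorted(val, key=lambda c: c.lower() in "aeiou")
--     return "".join(c.upper() for c in ordered[:3]).ljust(3, "X")
-- ===== Notes on version B (the rewrite author's own statement) =====
-- stated objective: alternative
-- what changed: Replaces A's stateful single pass with early break plus two fill/pad loops by a stable sort on the boolean is-vowel key (consonants before vowels, order preserved within each group), then a slice of the first three, uppercasing, and ljust-padding with X.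
import Mathlib
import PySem

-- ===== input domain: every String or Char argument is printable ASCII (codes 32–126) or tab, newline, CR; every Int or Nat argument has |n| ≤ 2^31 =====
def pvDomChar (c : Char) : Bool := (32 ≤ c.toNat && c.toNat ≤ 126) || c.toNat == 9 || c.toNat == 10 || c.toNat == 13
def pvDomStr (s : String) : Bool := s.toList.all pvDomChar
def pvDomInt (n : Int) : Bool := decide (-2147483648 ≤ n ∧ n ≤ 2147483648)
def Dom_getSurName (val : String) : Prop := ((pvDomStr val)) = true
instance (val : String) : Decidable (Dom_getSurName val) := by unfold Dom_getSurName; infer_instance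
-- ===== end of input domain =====

-- B replaces A's stateful early-break loop plus two fill/pad loops by one stable sort on
-- the is-vowel key (consonants before vowels, original order kept), slice, ljust-pad (alternative; same-order cost).

-- ===== PORT A =====
def vov : String := "aeiou"

def checkIfGo : List Char → Char → Bool
  | [], _ => false
  | i :: rest, x => if i = x then true else checkIfGo rest x

def checkIf (x : Char) : Bool := checkIfGo vov.toList x

-- A's main loop: state (tmp, ret), early break once ret has 3 chars
def loop1 : List Char → List Char → List Char → List Char × List Char
  | [], tmp, ret => (tmp, ret)
  | c :: rest, tmp, ret =>
    if !(checkIf c.toLower) && ret.length < 3 then loop1 rest tmp (ret ++ [c.toUpper])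
    else if 3 ≤ ret.length then (tmp, ret)
    else loop1 rest (tmp ++ [c.toUpper]) ret

-- A's fill loop: move chars of tmp into ret while len(ret) < 3
def loop2 : List Char → List Char → List Char
  | [], ret => ret
  | c :: rest, ret => if ret.length < 3 then loop2 rest (ret ++ [c]) else ret

-- A's pad loop: for i in range(3-len(ret)): ret += "X"
def padA (r : List Char) : List Char :=
  if r.length < 3 then (List.range (3 - r.length)).foldl (fun r _ => r ++ ['X']) r else r

-- A's post-loop code: conditional fill from tmp, then conditional pad
def postA (tmp ret : List Char) : List Char :=
  padA (if ret.length < 3 then loop2 tmp ret else ret)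

def getSurName (val : String) : String :=
  String.mk (postA (loop1 val.toList [] []).1 (loop1 val.toList [] []).2)

-- ===== PORT B =====
-- Source B's boolean sort key `c.lower() in "aeiou"` ported as 0/1 (Python sorts bools as ints, False < True)
def keyB (c : Char) : Nat := if "aeiou".toList.contains c.toLower then 1 else 0

def getSurName_alt (val : String) : String :=
  let ordered := PySem.List.sorted val.toList keyB false   -- sorted(val, key=…): stable sort
  let res := (ordered.take 3).map Char.toUpper             -- "".join(c.upper() for c in ordered[:3])
  String.mk (res ++ List.replicate (3 - res.length) 'X')   -- .ljust(3, "X"): pad right to width 3 (exact)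

-- ===== PRECONDITION & SPEC =====
def Spec_getSurName (val : String) (out : String) : Prop := out = getSurName_alt val
instance (val : String) (out : String) : Decidable (Spec_getSurName val out) := by unfold Spec_getSurName; infer_instance

-- ===== CLAIM (what is proved, stated in full; the proofs are below) =====
def Claim_equal_getSurName : Prop := ∀ (val : String), Dom_getSurName val → Spec_getSurName val (getSurName val)

-- ===== LEMMAS AND PROOFS =====

-- consonant / vowel sublists (original case and uppercased), named for the proofs
def consL (l : List Char) : List Char := l.filter (fun c => !("aeiou".toList.contains c.toLower))
def vowsL (l : List Char) : List Char := l.filter (fun c => "aeiou".toList.contains c.toLower)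
def consU (l : List Char) : List Char := (consL l).map Char.toUpper
def vowsU (l : List Char) : List Char := (vowsL l).map Char.toUpper

lemma consU_cons (c : Char) (rest : List Char) :
    consU (c :: rest) = if "aeiou".toList.contains c.toLower then consU rest
                        else c.toUpper :: consU rest := by
  cases hc : "aeiou".toList.contains c.toLower with
  | true => simp only [consU, consL, List.filter_cons, hc]; simp
  | false => simp only [consU, consL, List.filter_cons, hc]; simp

lemma vowsU_cons (c : Char) (rest : List Char) :
    vowsU (c :: rest) = if "aeiou".toList.contains c.toLower then c.toUpper :: vowsU rest
                        else vowsU rest := by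
  cases hc : "aeiou".toList.contains c.toLower with
  | true => simp only [vowsU, vowsL, List.filter_cons, hc]; simp
  | false => simp only [vowsU, vowsL, List.filter_cons, hc]; simp

lemma checkIfGo_eq (l : List Char) (x : Char) : checkIfGo l x = l.contains x := by
  induction l with
  | nil => rfl
  | cons i rest ih => simp [checkIfGo, ih, eq_comm (a := i)]

lemma checkIf_eq (x : Char) : checkIf x = "aeiou".toList.contains x := checkIfGo_eq _ x

lemma take3_left (r s : List Char) (h : r.length = 3) : (r ++ s).take 3 = r := by
  rw [← h, List.take_left]

lemma take3_take (l s : List Char) : ((l.take 3) ++ s).take 3 = (l ++ s).take 3 := by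
  by_cases h : 3 ≤ l.length
  · rw [List.take_append_of_le_length h, List.take_append_of_le_length (by simp [h]),
        List.take_take]
    simp
  · rw [List.take_of_length_le (by omega : l.length ≤ 3)]

lemma foldl_range_X (n : ℕ) (r : List Char) :
    (List.range n).foldl (fun r _ => r ++ ['X']) r = r ++ List.replicate n 'X' := by
  induction n generalizing r with
  | zero => simp
  | succ k ih => rw [List.range_succ, List.foldl_append, ih]; simp [List.replicate_succ']

lemma padA_eq (r : List Char) (h : r.length ≤ 3) :
    padA r = (r ++ ['X', 'X', 'X']).take 3 := by
  unfold padA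
  by_cases hl : r.length < 3
  · rw [if_pos hl, foldl_range_X]
    rcases r with _|⟨a,_|⟨b,_|⟨c,t⟩⟩⟩
    · rfl
    · rfl
    · rfl
    · have ht : t = [] := List.eq_nil_of_length_eq_zero (by simp at h; omega)
      subst ht; rfl
  · rw [if_neg hl, take3_left _ _ (by omega)]

lemma loop2_eq (tmp ret : List Char) (h : ret.length ≤ 3) :
    loop2 tmp ret = (ret ++ tmp).take 3 := by
  induction tmp generalizing ret with
  | nil => simp [loop2, List.take_of_length_le h]
  | cons c rest ih =>
    simp only [loop2]
    by_cases hl : ret.length < 3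
    · rw [if_pos hl, ih _ (by simp; omega)]; simp
    · rw [if_neg hl, take3_left _ _ (by omega)]

lemma postA_eq (tmp ret : List Char) (h : ret.length ≤ 3) :
    postA tmp ret = (ret ++ tmp ++ ['X', 'X', 'X']).take 3 := by
  unfold postA
  have hr1 : (if ret.length < 3 then loop2 tmp ret else ret) = (ret ++ tmp).take 3 := by
    by_cases hl : ret.length < 3
    · rw [if_pos hl, loop2_eq _ _ h]
    · rw [if_neg hl, take3_left _ _ (by omega)]
  rw [hr1, padA_eq _ (by simp), take3_take]

lemma loop1_inv (l : List Char) : ∀ tmp ret : List Char, ret.length ≤ 3 →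
    (loop1 l tmp ret).2.length ≤ 3 ∧
    ((loop1 l tmp ret).2 ++ (loop1 l tmp ret).1 ++ ['X', 'X', 'X']).take 3
      = (ret ++ consU l ++ tmp ++ vowsU l ++ ['X', 'X', 'X']).take 3 := by
  induction l with
  | nil =>
    intro tmp ret h
    refine ⟨h, ?_⟩
    simp [loop1, consU, vowsU, consL, vowsL]
  | cons c rest ih =>
    intro tmp ret h
    simp only [loop1]
    by_cases hl3 : ret.length < 3
    · by_cases hv : checkIf c.toLower = true
      · -- vowel: goes to tmp
        rw [if_neg (by simp [hv]), if_neg (by omega)]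
        obtain ⟨h1, h2⟩ := ih (tmp ++ [c.toUpper]) ret h
        refine ⟨h1, ?_⟩
        have hvc : ("aeiou".toList.contains c.toLower) = true := by rw [← checkIf_eq]; exact hv
        rw [h2, consU_cons, vowsU_cons, if_pos hvc, if_pos hvc]
        simp [List.append_assoc]
      · -- consonant: appended to ret
        rw [if_pos (by simp [hl3]; simpa using hv)]
        obtain ⟨h1, h2⟩ := ih tmp (ret ++ [c.toUpper]) (by simp; omega)
        refine ⟨h1, ?_⟩
        have hvc : ("aeiou".toList.contains c.toLower) = false := by
          rw [← checkIf_eq]; simpa using hv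
        rw [h2, consU_cons, vowsU_cons, if_neg (by rw [hvc]; simp), if_neg (by rw [hvc]; simp)]
        simp [List.append_assoc]
    · -- ret already full: break
      rw [if_neg (by simp; omega), if_pos (by omega)]
      refine ⟨h, ?_⟩
      simp only [List.append_assoc]
      rw [take3_left _ _ (by omega), take3_left _ _ (by omega)]

-- ===== B-side lemmas: the stable sort on the 0/1 key splits into consonants ++ vowels =====

-- insertion of a consonant into (consonants ++ vowels): lands at the end of the consonant block
lemma insertBy_split (x : Char) (cs vs : List Char)
    (hx : keyB x = 0) (hcs : ∀ y ∈ cs, keyB y = 0) (hvs : ∀ y ∈ vs, keyB y = 1) :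
    PySem.List.insertBy (fun a b => decide (keyB a < keyB b)) x (cs ++ vs) = cs ++ x :: vs := by
  induction cs with
  | nil =>
    cases vs with
    | nil => rfl
    | cons v vs' =>
      have : keyB v = 1 := hvs v (by simp)
      simp [PySem.List.insertBy, hx, this]
  | cons c cs' ih =>
    have hc : keyB c = 0 := hcs c (by simp)
    simp only [List.cons_append, PySem.List.insertBy, hx, hc]
    rw [ih (fun y hy => hcs y (by simp [hy]))]
    simp

-- insertion of a vowel: all keys ≤ its key, so it is appended at the end (stability)
lemma insertBy_vowel (x : Char) (l : List Char) (hx : keyB x = 1)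
    (hl : ∀ y ∈ l, keyB y ≤ 1) :
    PySem.List.insertBy (fun a b => decide (keyB a < keyB b)) x l = l ++ [x] := by
  apply PySem.List.insertBy_of_forall_not_before
  intro y hy
  have := hl y hy
  simp [hx]; omega

lemma keyB_eq_zero (c : Char) (h : ("aeiou".toList.contains c.toLower) = false) : keyB c = 0 := by
  simp only [keyB, h]; rfl

lemma keyB_eq_one (c : Char) (h : ("aeiou".toList.contains c.toLower) = true) : keyB c = 1 := by
  simp only [keyB, h]; rfl

lemma foldl_insertBy_inv (l : List Char) : ∀ cs vs : List Char,
    (∀ y ∈ cs, keyB y = 0) → (∀ y ∈ vs, keyB y = 1) →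
    l.foldl (fun acc x => PySem.List.insertBy (fun a b => decide (keyB a < keyB b)) x acc) (cs ++ vs)
      = (cs ++ consL l) ++ (vs ++ vowsL l) := by
  induction l with
  | nil => intro cs vs _ _; simp [consL, vowsL]
  | cons c rest ih =>
    intro cs vs hcs hvs
    simp only [List.foldl_cons]
    by_cases hv : ("aeiou".toList.contains c.toLower) = true
    · -- vowel: appended at the very end
      have hx := keyB_eq_one c hv
      rw [insertBy_vowel c (cs ++ vs) hx (by
        intro y hy
        rcases List.mem_append.mp hy with h | h
        · simp [hcs y h]
        · simp [hvs y h])]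
      rw [List.append_assoc, ih cs (vs ++ [c]) hcs (by
        intro y hy
        rcases List.mem_append.mp hy with h | h
        · exact hvs y h
        · simp at h; subst h; exact hx)]
      simp only [consL, vowsL, List.filter_cons, hv]
      simp
    · -- consonant: inserted at the end of the consonant block
      have hb : ("aeiou".toList.contains c.toLower) = false := by simpa using hv
      have hx := keyB_eq_zero c hb
      rw [insertBy_split c cs vs hx hcs hvs]
      have : cs ++ c :: vs = (cs ++ [c]) ++ vs := by simp
      rw [this, ih (cs ++ [c]) vs (by
        intro y hy
        rcases List.mem_append.mp hy with h | h
        · exact hcs y h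
        · simp at h; subst h; exact hx) hvs]
      simp only [consL, vowsL, List.filter_cons, hb]
      simp

lemma sorted_split (l : List Char) :
    PySem.List.sorted l keyB false = consL l ++ vowsL l := by
  rw [PySem.List.sorted_eq_foldl_insertBy]
  have := foldl_insertBy_inv l [] [] (by simp) (by simp)
  simpa using this

-- take-3-then-pad equals append-pad-then-take-3
lemma take_pad_eq (m : List Char) :
    (m.take 3).map Char.toUpper
      ++ List.replicate (3 - ((m.take 3).map Char.toUpper).length) 'X'
    = (m.map Char.toUpper ++ ['X', 'X', 'X']).take 3 := by
  rcases m with _|⟨a,_|⟨b,_|⟨c,t⟩⟩⟩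
  · rfl
  · rfl
  · rfl
  · simp [List.take_succ_cons, List.map_cons]

lemma getSurName_alt_eq (val : String) :
    getSurName_alt val = String.mk ((consU val.toList ++ vowsU val.toList ++ ['X', 'X', 'X']).take 3) := by
  show String.mk _ = _
  rw [sorted_split, take_pad_eq]
  simp [consU, vowsU, List.append_assoc]

-- ===== VERDICT (by name: the statement is the Claim_ definition above) =====
theorem getSurName_spec : Claim_equal_getSurName := by
  intro val _
  show getSurName val = getSurName_alt val
  obtain ⟨h3, hinv⟩ := loop1_inv val.toList [] [] (by simp)
  rw [getSurName_alt_eq]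
  show String.mk (postA _ _) = _
  rw [postA_eq _ _ h3, hinv]
  simp [List.append_assoc]
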